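-- pv_equiv track=rewrite | github.com/ccic-data/FAIMS_parser | scripts/FAIMS_parser.py | string_parser
-- ===== SOURCE A (Python) =====
-- def string_parser(string, index_num):
--     temp_str = ''
--     quote_count = 0
--
--     for i in range(len(string)):
--         if i == 25:
--             temp_str = temp_str + str(index_num)
--             break
--         else:
--             temp_str = temp_str + string[i]
--
--     for i in range(len(string)):
--         if string[i] == '"':
--             quote_count = quote_count + 1
--
--         if quote_count == 2:
--             temp_str = temp_str + '" id="controllerType=0 controllerNumber=1 scan=' + str(index_num+1)
--             break
--
--     quote_count = 0
--
--     for i in range(len(string)):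
--         if string[i] == '"':
--             quote_count = quote_count + 1
--         if quote_count >= 4:
--             temp_str = temp_str + string[i]
--
--     return temp_str
-- ===== SOURCE B (Python) =====
-- def string_parser(string, index_num):
--     quotes = [i for i, c in enumerate(string) if c == '"']
--     out = string[:25]
--     if len(string) > 25:
--         out += str(index_num)
--     if len(quotes) >= 2:
--         out += '" id="controllerType=0 controllerNumber=1 scan=' + str(index_num + 1)
--     if len(quotes) >= 4:
--         out += string[quotes[3]:]
--     return out
-- ===== Notes on version B (the rewrite author's own statement) =====
-- stated objective: simpler
-- what changed: A's three separate whole-string scans (char-by-char prefix copy, two quote-counting loops with break) are replaced by one pass collecting quote indices plus direct slicing string[:25] and string[quotes[3]:].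
import Mathlib
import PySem

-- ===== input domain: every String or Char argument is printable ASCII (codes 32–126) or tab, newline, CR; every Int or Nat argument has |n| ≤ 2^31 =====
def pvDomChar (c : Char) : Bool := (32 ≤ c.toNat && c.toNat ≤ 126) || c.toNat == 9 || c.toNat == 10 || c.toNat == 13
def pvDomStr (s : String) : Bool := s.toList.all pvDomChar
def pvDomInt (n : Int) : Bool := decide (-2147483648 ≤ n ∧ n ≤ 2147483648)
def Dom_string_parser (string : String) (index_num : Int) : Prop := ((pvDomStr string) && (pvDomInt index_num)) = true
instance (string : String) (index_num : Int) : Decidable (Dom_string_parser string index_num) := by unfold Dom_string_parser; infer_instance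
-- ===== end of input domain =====

-- B replaces A's three separate whole-string scans by one quote-index pass plus direct slicing (objective: simpler).

-- ===== PORT A =====
-- the fixed literal appended after the second quote (the same constant both Pythons spell out)
def spLit : List Char := "\" id=\"controllerType=0 controllerNumber=1 scan=".toList

-- A's first loop: copy chars until i == 25, then append str(index_num) and break
def spA_loop1 : List Char → Nat → Int → List Char → List Char
  | [], _, _, acc => acc
  | c :: rest, i, idx, acc =>
    if i = 25 then acc ++ PySem.Int.toChars idx
    else spA_loop1 rest (i + 1) idx (acc ++ [c])

-- A's second loop: count quotes; when the count reaches 2 append the literal + str(index_num+1) and break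
def spA_loop2 : List Char → Nat → Int → List Char → List Char
  | [], _, _, acc => acc
  | c :: rest, qc, idx, acc =>
    let qc' := if c = '"' then qc + 1 else qc
    if qc' = 2 then acc ++ spLit ++ PySem.Int.toChars (idx + 1)
    else spA_loop2 rest qc' idx acc

-- A's third loop: append every char from the fourth quote (inclusive) onwards
def spA_loop3 : List Char → Nat → List Char → List Char
  | [], _, acc => acc
  | c :: rest, qc, acc =>
    let qc' := if c = '"' then qc + 1 else qc
    spA_loop3 rest qc' (if 4 ≤ qc' then acc ++ [c] else acc)

def string_parser (string : String) (index_num : Int) : String :=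
  String.ofList (spA_loop3 string.toList 0
    (spA_loop2 string.toList 0 index_num
      (spA_loop1 string.toList 0 index_num [])))

-- ===== PORT B =====
def string_parser_alt (string : String) (index_num : Int) : String :=
  let cs := string.toList
  let quotes := ((PySem.List.enumerate cs 0).filter (fun p => p.2 == '"')).map (·.1)
  let out := PySem.List.slice cs none (some 25)
  let out := if 25 < cs.length then out ++ PySem.Int.toChars index_num else out
  let out := if 2 ≤ quotes.length then out ++ spLit ++ PySem.Int.toChars (index_num + 1) else out
  let out := if 4 ≤ quotes.length then out ++ PySem.List.slice cs quotes[3]? none else out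
  String.ofList out

-- ===== PRECONDITION & SPEC =====
def Spec_string_parser (string : String) (index_num : Int) (out : String) : Prop := out = string_parser_alt string index_num
instance (string : String) (index_num : Int) (out : String) : Decidable (Spec_string_parser string index_num out) := by unfold Spec_string_parser; infer_instance

-- ===== CLAIM (what is proved, stated in full; the proofs are below) =====
def Claim_equal_string_parser : Prop := ∀ (string : String) (index_num : Int), Dom_string_parser string index_num → Spec_string_parser string index_num (string_parser string index_num)

-- ===== LEMMAS AND PROOFS =====

-- loop 1 produces: the first 25 chars, plus str(index_num) iff the string is longer than 25
theorem spA_loop1_eq (idx : Int) : ∀ (cs : List Char) (i : Nat) (acc : List Char), i ≤ 25 →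
    spA_loop1 cs i idx acc =
      acc ++ cs.take (25 - i) ++ (if 25 - i < cs.length then PySem.Int.toChars idx else []) := by
  intro cs
  induction cs with
  | nil => intro i acc _; simp [spA_loop1]
  | cons c rest ih =>
    intro i acc hi
    by_cases h25 : i = 25
    · subst h25; simp [spA_loop1]
    · have h1 : 25 - i = (25 - (i + 1)) + 1 := by omega
      rw [spA_loop1, if_neg h25, ih (i + 1) (acc ++ [c]) (by omega), h1]
      by_cases hl : 25 - (i + 1) < rest.length
      · rw [if_pos hl, if_pos (by simp; omega)]
        simp
      · rw [if_neg hl, if_neg (by simp; omega)]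
        simp

-- loop 2 appends the literal + str(idx+1) iff the quote count reaches 2
theorem spA_loop2_eq (idx : Int) : ∀ (cs : List Char) (qc : Nat) (acc : List Char), qc ≤ 1 →
    spA_loop2 cs qc idx acc =
      acc ++ (if 2 ≤ qc + cs.count '"' then spLit ++ PySem.Int.toChars (idx + 1) else []) := by
  intro cs
  induction cs with
  | nil => intro qc acc hqc; rw [spA_loop2]; simp; omega
  | cons c rest ih =>
    intro qc acc hqc
    rw [spA_loop2]
    by_cases hc : c = '"'
    · rw [if_pos hc]
      by_cases h2 : qc + 1 = 2
      · rw [if_pos h2, if_pos (by simp [hc]; omega)]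
        simp
      · rw [if_neg h2, ih (qc + 1) acc (by omega)]
        have he : (2 ≤ qc + 1 + rest.count '"') = (2 ≤ qc + List.count '"' (c :: rest)) := by
          simp [hc]; constructor <;> (intro; omega)
        simp only [he]
    · rw [if_neg hc, if_neg (by omega), ih qc acc hqc]
      have he : (2 ≤ qc + rest.count '"') = (2 ≤ qc + List.count '"' (c :: rest)) := by
        simp [hc]
      simp only [he]

-- the suffix of cs starting at its k-th quote (inclusive)
def spSuf : List Char → Nat → List Char
  | [], _ => []
  | c :: rest, k =>
    if c = '"' then (if k ≤ 1 then c :: rest else spSuf rest (k - 1))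
    else spSuf rest k

-- once the quote count has reached 4, loop 3 appends everything
theorem spA_loop3_ge : ∀ (cs : List Char) (qc : Nat) (acc : List Char), 4 ≤ qc →
    spA_loop3 cs qc acc = acc ++ cs := by
  intro cs
  induction cs with
  | nil => intro qc acc _; simp [spA_loop3]
  | cons c rest ih =>
    intro qc acc h
    rw [spA_loop3]
    by_cases hc : c = '"'
    · rw [if_pos hc, if_pos (by omega), ih (qc + 1) (acc ++ [c]) (by omega)]
      simp
    · rw [if_neg hc, if_pos (by omega), ih qc (acc ++ [c]) h]
      simp

-- loop 3 appends exactly the suffix from the (4 - qc)-th remaining quote onwards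
theorem spA_loop3_eq : ∀ (cs : List Char) (qc : Nat) (acc : List Char), qc < 4 →
    spA_loop3 cs qc acc = acc ++ spSuf cs (4 - qc) := by
  intro cs
  induction cs with
  | nil => intro qc acc _; simp [spA_loop3, spSuf]
  | cons c rest ih =>
    intro qc acc hqc
    rw [spA_loop3, spSuf]
    by_cases hc : c = '"'
    · rw [if_pos hc, if_pos hc]
      by_cases h3 : qc = 3
      · subst h3
        rw [if_pos (by omega), if_pos (by omega), spA_loop3_ge rest 4 (acc ++ [c]) (by omega)]
        simp [hc]
      · rw [if_neg (by omega : ¬ 4 ≤ qc + 1), if_neg (by omega : ¬ 4 - qc ≤ 1),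
            ih (qc + 1) acc (by omega)]
        have h4 : 4 - (qc + 1) = 4 - qc - 1 := by omega
        rw [h4]
    · rw [if_neg hc, if_neg hc, if_neg (by omega : ¬ 4 ≤ qc), ih qc acc hqc]

-- with fewer than k quotes the suffix is empty
theorem spSuf_of_count_lt : ∀ (cs : List Char) (k : Nat), cs.count '"' < k → spSuf cs k = [] := by
  intro cs
  induction cs with
  | nil => intro k _; simp [spSuf]
  | cons c rest ih =>
    intro k hk
    rw [spSuf]
    by_cases hc : c = '"'
    · subst hc
      simp at hk
      rw [if_pos rfl, if_neg (by omega)]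
      exact ih (k - 1) (by omega)
    · rw [if_neg hc]
      exact ih k (by simpa [hc] using hk)

-- the list of quote positions, as naturals
def spQ : List Char → List Nat
  | [] => []
  | c :: rest => if c = '"' then 0 :: (spQ rest).map (· + 1) else (spQ rest).map (· + 1)

theorem spQ_length : ∀ (cs : List Char), (spQ cs).length = cs.count '"' := by
  intro cs
  induction cs with
  | nil => simp [spQ]
  | cons c rest ih =>
    by_cases hc : c = '"' <;> simp [spQ, hc, ih]

-- B's quotes list is spQ, cast to Int and shifted by the enumerate start
theorem spQ_enum : ∀ (cs : List Char) (s : Int),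
    ((PySem.List.enumerate cs s).filter (fun p => p.2 == '"')).map (·.1)
      = (spQ cs).map (fun (n : Nat) => s + (n : Int)) := by
  intro cs
  induction cs with
  | nil => intro s; simp [PySem.List.enumerate_nil, spQ]
  | cons c rest ih =>
    intro s
    rw [PySem.List.enumerate_cons, spQ]
    by_cases hc : c = '"'
    · rw [if_pos hc, List.filter_cons]
      have hb : ((s, c).2 == '"') = true := by simp [hc]
      rw [if_pos hb, List.map_cons, ih (s + 1), List.map_cons, List.map_map]
      refine congrArg₂ _ (by simp) (List.map_congr_left ?_)
      intro a _
      simp [Function.comp]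
      ring
    · rw [if_neg hc, List.filter_cons]
      have hb : ¬ ((s, c).2 == '"') = true := by simp [hc]
      rw [if_neg hb, ih (s + 1), List.map_map]
      refine List.map_congr_left ?_
      intro a _
      simp [Function.comp]
      ring

-- dropping at the k-th recorded quote position gives the suffix from the (k+1)-th quote
theorem spQ_drop : ∀ (cs : List Char) (k : Nat) (q : Nat), (spQ cs)[k]? = some q →
    cs.drop q = spSuf cs (k + 1) := by
  intro cs
  induction cs with
  | nil => intro k q h; simp [spQ] at h
  | cons c rest ih =>
    intro k q h
    rw [spSuf]
    by_cases hc : c = '"'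
    · rw [spQ, if_pos hc] at h
      cases k with
      | zero =>
        simp at h
        subst h
        simp [hc]
      | succ k' =>
        simp only [List.getElem?_cons_succ, List.getElem?_map] at h
        cases hq' : (spQ rest)[k']? with
        | none => rw [hq'] at h; simp at h
        | some q' =>
          rw [hq'] at h; simp at h
          rw [if_pos hc, if_neg (by omega)]
          have hrec := ih k' q' hq'
          have hq : q = q' + 1 := by omega
          subst hq
          simpa using hrec
    · rw [spQ, if_neg hc] at h
      simp only [List.getElem?_map] at h
      cases hq' : (spQ rest)[k]? with
      | none => rw [hq'] at h; simp at h
      | some q' =>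
        rw [hq'] at h; simp at h
        rw [if_neg hc]
        have hrec := ih k q' hq'
        have hq : q = q' + 1 := by omega
        subst hq
        simpa using hrec

-- ===== VERDICT (by name: the statement is the Claim_ definition above) =====
theorem string_parser_spec : Claim_equal_string_parser := by
  intro string index_num _
  show string_parser string index_num = string_parser_alt string index_num
  simp only [string_parser, string_parser_alt]
  rw [spA_loop1_eq index_num string.toList 0 [] (by omega),
      spA_loop2_eq index_num string.toList 0 _ (by omega),
      spQ_enum string.toList 0,
      PySem.List.slice_to string.toList (by omega : (0 : Int) ≤ 25)]
  simp only [Nat.sub_zero, Nat.zero_add, List.nil_append, List.length_map, spQ_length]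
  norm_num
  by_cases h4 : 4 ≤ string.toList.count '"'
  · have h3 : (spQ string.toList).length = string.toList.count '"' := spQ_length string.toList
    have hlt : 3 < (spQ string.toList).length := by omega
    have hsome : (spQ string.toList)[3]? = some ((spQ string.toList)[3]'hlt) := by simp
    rw [spA_loop3_eq string.toList 0 _ (by omega), hsome]
    simp only [Option.map_some, Nat.sub_zero, show ((25 : Int).toNat) = 25 from rfl]
    rw [PySem.List.slice_from_natCast,
        spQ_drop string.toList 3 ((spQ string.toList)[3]'hlt) hsome,
        if_pos h4, if_pos (by omega : 2 ≤ string.toList.count '"')]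
    refine congrArg String.ofList ?_
    by_cases hP : 25 < string.length <;>
      simp [hP, (by omega : 2 ≤ List.count '"' string.toList), List.append_assoc]
  · rw [spA_loop3_eq string.toList 0 _ (by omega)]
    simp only [Nat.sub_zero]
    rw [spSuf_of_count_lt string.toList 4 (by omega), if_neg h4]
    refine congrArg String.ofList ?_
    simp only [show ((25 : Int).toNat) = 25 from rfl]
    by_cases hP : 25 < string.length <;>
      by_cases h2 : 2 ≤ string.toList.count '"' <;> simp [hP, h2, List.append_assoc]
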